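-- pv_equiv track=rewrite | github.com/florrocio17/Ejercicios-Algoritmia | simulacro2parcial.py | eliminarminimo2
-- ===== SOURCE A (Python) =====
-- def eliminarminimo2(lista, minimo):
--     min = minimo
--     i = 0
--     while i < len(lista):
--         if lista[i] == min:
--             del lista[i]
--             i = i -1
--         i = i + 1
--     return lista
-- ===== SOURCE B (Python) =====
-- def eliminarminimo2(lista, minimo):
--     w = 0
--     for x in lista:
--         if x != minimo:
--             lista[w] = x
--             w += 1
--     del lista[w:]
--     return lista
-- ===== Notes on version B (the rewrite author's own statement) =====
-- stated objective: faster
-- what changed: Replaced the delete-at-index-and-rewind while loop (each del shifts the tail) by a single forward two-pointer in-place compaction followed by one tail truncation.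
import Mathlib
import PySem

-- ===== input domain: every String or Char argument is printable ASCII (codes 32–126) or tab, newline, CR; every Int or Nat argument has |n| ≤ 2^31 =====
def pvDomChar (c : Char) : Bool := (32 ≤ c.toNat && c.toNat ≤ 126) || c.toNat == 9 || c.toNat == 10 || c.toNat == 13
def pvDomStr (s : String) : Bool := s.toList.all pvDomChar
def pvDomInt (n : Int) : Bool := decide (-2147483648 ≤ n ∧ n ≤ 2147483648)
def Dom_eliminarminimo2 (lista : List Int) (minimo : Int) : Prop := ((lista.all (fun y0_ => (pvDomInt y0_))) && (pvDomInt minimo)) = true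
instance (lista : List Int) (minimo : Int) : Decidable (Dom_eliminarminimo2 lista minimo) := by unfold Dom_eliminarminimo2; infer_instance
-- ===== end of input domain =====

-- B replaces A's quadratic delete-at-index-and-rewind loop by a linear two-pointer
-- in-place compaction; both Pythons mutate the argument list in place the same way,
-- and the equivalence proved here is about the returned value.

-- ===== PORT A =====
-- A's while loop: i scans; on lista[i] == min, del lista[i] and re-test the same index.
def elimLoopA (lista : List Int) (i : Nat) (minv : Int) : List Int :=
  if h : i < lista.length then
    if lista[i] == minv then
      -- del lista[i]; i = i - 1; i = i + 1  (net: i unchanged)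
      elimLoopA (lista.eraseIdx i) i minv
    else
      elimLoopA lista (i + 1) minv
  else lista
termination_by lista.length - i
decreasing_by
  · simp [List.length_eraseIdx, h]; omega
  · omega

def eliminarminimo2 (lista : List Int) (minimo : Int) : List Int :=
  elimLoopA lista 0 minimo

-- ===== PORT B =====
-- Two-pointer compaction: the state is the written prefix lista[:w]; lista[w] = x; w += 1
-- extends it by x, and del lista[w:] keeps exactly that prefix.
def eliminarminimo2_alt (lista : List Int) (minimo : Int) : List Int :=
  lista.foldl (fun written x => if x ≠ minimo then written ++ [x] else written) []

-- ===== PRECONDITION & SPEC =====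
def Spec_eliminarminimo2 (lista : List Int) (minimo : Int) (out : List Int) : Prop := out = eliminarminimo2_alt lista minimo
instance (lista : List Int) (minimo : Int) (out : List Int) : Decidable (Spec_eliminarminimo2 lista minimo out) := by unfold Spec_eliminarminimo2; infer_instance

-- ===== CLAIM (what is proved, stated in full; the proofs are below) =====
def Claim_equal_eliminarminimo2 : Prop := ∀ (lista : List Int) (minimo : Int), Dom_eliminarminimo2 lista minimo → Spec_eliminarminimo2 lista minimo (eliminarminimo2 lista minimo)

-- ===== LEMMAS AND PROOFS =====

-- A's loop keeps the already-scanned prefix and filters the unscanned suffix.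
theorem elimLoopA_eq (minv : Int) (lista : List Int) (i : Nat) :
    elimLoopA lista i minv = lista.take i ++ (lista.drop i).filter (fun x => !(x == minv)) := by
  by_cases h : i < lista.length
  · rw [elimLoopA]
    simp only [h, dif_pos]
    by_cases he : lista[i] = minv
    · simp only [he, beq_self_eq_true, if_pos]
      rw [elimLoopA_eq minv (lista.eraseIdx i) i, List.eraseIdx_eq_take_drop_succ]
      have hlen : (lista.take i).length = i := List.length_take_of_le (by omega)
      have hdi : lista.drop i = lista[i] :: lista.drop (i + 1) :=
        List.drop_eq_getElem_cons h
      have h1 : (lista.take i ++ lista.drop (i + 1)).take i = lista.take i := by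
        have := List.take_left (l₁ := lista.take i) (l₂ := lista.drop (i + 1))
        rwa [hlen] at this
      have h2 : (lista.take i ++ lista.drop (i + 1)).drop i = lista.drop (i + 1) := by
        have := List.drop_left (l₁ := lista.take i) (l₂ := lista.drop (i + 1))
        rwa [hlen] at this
      rw [h1, h2]
      rw [hdi, List.filter_cons]
      simp [he]
    · have hne : (lista[i] == minv) = false := by simp [he]
      simp only [hne, Bool.false_eq_true, if_neg, not_false_iff]
      rw [elimLoopA_eq minv lista (i + 1)]
      have hdi : lista.drop i = lista[i] :: lista.drop (i + 1) :=
        List.drop_eq_getElem_cons h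
      rw [hdi, List.filter_cons]
      simp only [hne]
      have ht : lista.take (i + 1) = lista.take i ++ [lista[i]] := by
        rw [List.take_add_one]
        simp [List.getElem?_eq_getElem h]
      rw [ht, List.append_assoc]
      rfl
  · rw [elimLoopA]
    simp only [h, dif_neg, not_false_iff]
    rw [List.take_of_length_le (by omega), List.drop_of_length_le (by omega)]
    simp
termination_by lista.length - i
decreasing_by
  · simp [List.length_eraseIdx, h]; omega
  · omega

-- ===== VERDICT (by name: the statement is the Claim_ definition above) =====
theorem eliminarminimo2_spec : Claim_equal_eliminarminimo2 := by
  intro lista minimo _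
  unfold Spec_eliminarminimo2 eliminarminimo2 eliminarminimo2_alt
  rw [elimLoopA_eq]
  have := PySem.List.foldl_append_if (fun x => !(x == minimo)) (fun x => x) lista []
  simp only [List.map_id'] at this
  rw [show (fun (written : List Int) (x : Int) => if x ≠ minimo then written ++ [x] else written)
        = (fun (written : List Int) (x : Int) => if (!(x == minimo)) = true then written ++ [x] else written) by
      funext w x; by_cases hx : x = minimo <;> simp [hx]]
  rw [this]
  simp
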